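-- pv_equiv track=rewrite | github.com/kabomekgwe/gospel-keys | backend/app/pipeline/voice_leading_analyzer.py | _classify_motions
-- ===== SOURCE A (Python) =====
-- from typing import List, Dict, Tuple, Optional
--
-- def _classify_motions(movements: List[int]) -> Dict[str, int]:
--     """Classify motion types from voice movements"""
--     counts = {
--         "parallel": 0,
--         "similar": 0,
--         "contrary": 0,
--         "oblique": 0,
--         "static": 0
--     }
--
--     for i, m1 in enumerate(movements):
--         for m2 in movements[i+1:]:
--             if m1 == 0 and m2 == 0:
--                 counts["static"] += 1
--             elif m1 == 0 or m2 == 0: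
--                 counts["oblique"] += 1
--             elif m1 == m2:
--                 counts["parallel"] += 1
--             elif (m1 > 0 and m2 > 0) or (m1 < 0 and m2 < 0):
--                 counts["similar"] += 1
--             else:
--                 counts["contrary"] += 1
--
--     return counts
-- ===== SOURCE B (Python) =====
-- def _classify_motions(movements):
--     """Classify motion types from voice movements (one pass + combinatorial formulas)."""
--     n = len(movements)
--     zeros = pos = neg = 0
--     freq = {}
--     for m in movements:
--         if m == 0:
--             zeros += 1
--         else:
--             if m > 0:
--                 pos += 1
--             else:
--                 neg += 1
--             freq[m] = freq.get(m, 0) + 1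
--     parallel = sum(c * (c - 1) // 2 for c in freq.values())
--     return {
--         "parallel": parallel,
--         "similar": pos * (pos - 1) // 2 + neg * (neg - 1) // 2 - parallel,
--         "contrary": pos * neg,
--         "oblique": zeros * (n - zeros),
--         "static": zeros * (zeros - 1) // 2,
--     }
-- ===== Notes on version B (the rewrite author's own statement) =====
-- stated objective: faster
-- what changed: Replaces A's O(n^2) scan over all index pairs by a single O(n) tally pass (zeros, positives, negatives, frequency dict of nonzero values) and computes each motion count by a closed-form combinatorial formula.
import Mathlib
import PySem

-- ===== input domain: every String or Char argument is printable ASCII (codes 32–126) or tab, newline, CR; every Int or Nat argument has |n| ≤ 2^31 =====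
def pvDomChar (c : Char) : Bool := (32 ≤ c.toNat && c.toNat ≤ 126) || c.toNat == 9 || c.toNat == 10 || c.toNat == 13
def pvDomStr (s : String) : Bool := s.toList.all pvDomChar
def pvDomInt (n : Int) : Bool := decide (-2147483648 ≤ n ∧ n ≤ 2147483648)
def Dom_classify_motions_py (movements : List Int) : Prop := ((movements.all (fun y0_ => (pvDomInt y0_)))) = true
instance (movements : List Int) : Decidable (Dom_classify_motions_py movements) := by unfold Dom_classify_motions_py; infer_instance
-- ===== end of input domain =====

-- B replaces A's quadratic all-pairs scan by one linear tally pass (zeros/positives/negatives/value frequencies) and closed-form pair counts.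

-- ===== PORT A =====
-- the body of A's inner loop: the if/elif chain incrementing one bucket of the counts dict
def pvStepA (counts : PySem.Dict String Int) (m1 m2 : Int) : PySem.Dict String Int :=
  if m1 = 0 ∧ m2 = 0 then counts.modify "static" 0 (· + 1)
  else if m1 = 0 ∨ m2 = 0 then counts.modify "oblique" 0 (· + 1)
  else if m1 = m2 then counts.modify "parallel" 0 (· + 1)
  else if (m1 > 0 ∧ m2 > 0) ∨ (m1 < 0 ∧ m2 < 0) then counts.modify "similar" 0 (· + 1)
  else counts.modify "contrary" 0 (· + 1)

-- A's inner loop: for m2 in movements[i+1:]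
def pvInnerA (movements : List Int) (counts : PySem.Dict String Int) (p : Int × Int) : PySem.Dict String Int :=
  (PySem.List.slice movements (some (p.1 + 1)) none).foldl (fun c m2 => pvStepA c p.2 m2) counts

def classify_motions_py (movements : List Int) : List (String × Int) :=
  let counts : PySem.Dict String Int :=
    PySem.Dict.ofList [("parallel", 0), ("similar", 0), ("contrary", 0), ("oblique", 0), ("static", 0)]
  ((PySem.List.enumerate movements 0).foldl (pvInnerA movements) counts).items

-- ===== PORT B =====
-- B's single tally pass: zeros / positives / negatives and the frequency dict of nonzero movements
def pvTallyB (s : Int × Int × Int × PySem.Dict Int Int) (m : Int) : Int × Int × Int × PySem.Dict Int Int :=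
  let (zeros, pos, neg, freq) := s
  if m = 0 then (zeros + 1, pos, neg, freq)
  else
    let freq' := freq.insert m (freq.getD m 0 + 1)
    if m > 0 then (zeros, pos + 1, neg, freq') else (zeros, pos, neg + 1, freq')

def classify_motions_py_alt (movements : List Int) : List (String × Int) :=
  let n : Int := movements.length
  let st := movements.foldl pvTallyB (0, 0, 0, PySem.Dict.empty)
  let zeros := st.1
  let pos := st.2.1
  let neg := st.2.2.1
  let freq := st.2.2.2
  let parallel := (freq.values.map (fun c => PySem.Int.floordiv (c * (c - 1)) 2)).sum
  [("parallel", parallel),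
   ("similar", PySem.Int.floordiv (pos * (pos - 1)) 2 + PySem.Int.floordiv (neg * (neg - 1)) 2 - parallel),
   ("contrary", pos * neg),
   ("oblique", zeros * (n - zeros)),
   ("static", PySem.Int.floordiv (zeros * (zeros - 1)) 2)]

-- ===== PRECONDITION & SPEC =====
def Spec_classify_motions_py (movements : List Int) (out : List (String × Int)) : Prop := out = classify_motions_py_alt movements
instance (movements : List Int) (out : List (String × Int)) : Decidable (Spec_classify_motions_py movements out) := by unfold Spec_classify_motions_py; infer_instance

-- ===== CLAIM (what is proved, stated in full; the proofs are below) =====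
def Claim_equal_classify_motions_py : Prop := ∀ (movements : List Int), Dom_classify_motions_py movements → Spec_classify_motions_py movements (classify_motions_py movements)

-- ===== LEMMAS AND PROOFS =====

-- element tallies
def cntZ : List Int → Int | [] => 0 | x :: r => (if x = 0 then 1 else 0) + cntZ r
def cntP : List Int → Int | [] => 0 | x :: r => (if x > 0 then 1 else 0) + cntP r
def cntN : List Int → Int | [] => 0 | x :: r => (if x < 0 then 1 else 0) + cntN r
def cntE (v : Int) : List Int → Int | [] => 0 | x :: r => (if x = v then 1 else 0) + cntE v r

-- pair-classification counts of A's double loop (head against tail, then recurse)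
def sP : List Int → Int | [] => 0 | x :: r => (if x = 0 then 0 else cntE x r) + sP r
def sS : List Int → Int | [] => 0 | x :: r => (if x > 0 then cntP r - cntE x r else if x < 0 then cntN r - cntE x r else 0) + sS r
def sC : List Int → Int | [] => 0 | x :: r => (if x > 0 then cntN r else if x < 0 then cntP r else 0) + sC r
def sO : List Int → Int | [] => 0 | x :: r => (if x = 0 then cntP r + cntN r else cntZ r) + sO r
def sSt : List Int → Int | [] => 0 | x :: r => (if x = 0 then cntZ r else 0) + sSt r

-- classification key of one pair (A's branch order)
def clsKey (m1 m2 : Int) : String :=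
  if m1 = 0 ∧ m2 = 0 then "static"
  else if m1 = 0 ∨ m2 = 0 then "oblique"
  else if m1 = m2 then "parallel"
  else if (m1 > 0 ∧ m2 > 0) ∨ (m1 < 0 ∧ m2 < 0) then "similar"
  else "contrary"

def icnt (m1 : Int) (k : String) : List Int → Int
  | [] => 0 | y :: r => (if clsKey m1 y = k then 1 else 0) + icnt m1 k r

def pcnt (k : String) : List Int → Int
  | [] => 0 | x :: r => icnt x k r + pcnt k r

theorem getD_pvStepA (d : PySem.Dict String Int) (m1 m2 : Int) (k : String) :
    (pvStepA d m1 m2).getD k 0 = d.getD k 0 + (if clsKey m1 m2 = k then 1 else 0) := by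
  unfold pvStepA clsKey
  split_ifs <;> rw [PySem.Dict.getD_modify] <;> split_ifs with h1 <;> simp_all

def K5 : List String := ["parallel", "similar", "contrary", "oblique", "static"]

theorem keys_pvStepA (d : PySem.Dict String Int) (m1 m2 : Int) (h : d.keys = K5) :
    (pvStepA d m1 m2).keys = K5 := by
  have hc : ∀ k ∈ K5, d.contains k = true := by
    intro k hk; rw [PySem.Dict.contains_iff_mem_keys, h]; exact hk
  have c1 : d.contains "parallel" = true := hc _ (by simp [K5])
  have c2 : d.contains "similar" = true := hc _ (by simp [K5])
  have c3 : d.contains "contrary" = true := hc _ (by simp [K5])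
  have c4 : d.contains "oblique" = true := hc _ (by simp [K5])
  have c5 : d.contains "static" = true := hc _ (by simp [K5])
  unfold pvStepA
  split_ifs <;>
    simp only [PySem.Dict.keys_modify,
      PySem.Dict.keys_insert_of_contains (h := c1), PySem.Dict.keys_insert_of_contains (h := c2),
      PySem.Dict.keys_insert_of_contains (h := c3), PySem.Dict.keys_insert_of_contains (h := c4),
      PySem.Dict.keys_insert_of_contains (h := c5)] <;> exact h

theorem innerA_getD (m1 : Int) (k : String) :
    ∀ (ys : List Int) (d : PySem.Dict String Int),
      (ys.foldl (fun c m2 => pvStepA c m1 m2) d).getD k 0 = d.getD k 0 + icnt m1 k ys := by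
  intro ys
  induction ys with
  | nil => intro d; simp [icnt]
  | cons y r ih => intro d; simp [icnt, ih, getD_pvStepA]; omega

theorem innerA_keys (m1 : Int) :
    ∀ (ys : List Int) (d : PySem.Dict String Int), d.keys = K5 →
      (ys.foldl (fun c m2 => pvStepA c m1 m2) d).keys = K5 := by
  intro ys
  induction ys with
  | nil => intro d h; simpa using h
  | cons y r ih => intro d h; exact ih _ (keys_pvStepA _ _ _ h)

theorem slice_suffix (pre suf : List Int) (x : Int) :
    PySem.List.slice (pre ++ x :: suf) (some ((pre.length : Int) + 1)) none = suf := by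
  have h := PySem.List.slice_from_natCast (pre ++ x :: suf) (pre.length + 1)
  push_cast at h
  rw [h]
  have : pre ++ x :: suf = (pre ++ [x]) ++ suf := by simp
  rw [this]
  have hl : (pre ++ [x]).length = pre.length + 1 := by simp
  rw [← hl, List.drop_left]

theorem outerA_getD (k : String) :
    ∀ (suf pre : List Int) (d : PySem.Dict String Int),
      ((PySem.List.enumerate suf (pre.length : Int)).foldl (pvInnerA (pre ++ suf)) d).getD k 0
        = d.getD k 0 + pcnt k suf := by
  intro suf
  induction suf with
  | nil => intro pre d; simp [PySem.List.enumerate_nil, pcnt]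
  | cons x r ih =>
    intro pre d
    rw [PySem.List.enumerate_cons, List.foldl_cons]
    have hstep : pvInnerA (pre ++ x :: r) d ((pre.length : Int), x)
        = r.foldl (fun c m2 => pvStepA c x m2) d := by
      unfold pvInnerA; rw [slice_suffix]
    rw [hstep]
    have hassoc : pre ++ x :: r = (pre ++ [x]) ++ r := by simp
    have hlen : ((pre.length : Int) + 1) = (((pre ++ [x]).length : Nat) : Int) := by
      simp
    rw [hassoc, hlen, ih (pre ++ [x])]
    rw [innerA_getD]
    simp [pcnt]; omega

theorem outerA_keys :
    ∀ (suf pre : List Int) (d : PySem.Dict String Int), d.keys = K5 →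
      ((PySem.List.enumerate suf (pre.length : Int)).foldl (pvInnerA (pre ++ suf)) d).keys = K5 := by
  intro suf
  induction suf with
  | nil => intro pre d h; simpa [PySem.List.enumerate_nil] using h
  | cons x r ih =>
    intro pre d h
    rw [PySem.List.enumerate_cons, List.foldl_cons]
    have hstep : pvInnerA (pre ++ x :: r) d ((pre.length : Int), x)
        = r.foldl (fun c m2 => pvStepA c x m2) d := by
      unfold pvInnerA; rw [slice_suffix]
    rw [hstep]
    have hassoc : pre ++ x :: r = (pre ++ [x]) ++ r := by simp
    have hlen : ((pre.length : Int) + 1) = (((pre ++ [x]).length : Nat) : Int) := by simp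
    rw [hassoc, hlen]
    exact ih (pre ++ [x]) _ (innerA_keys _ _ _ h)

-- per-key characterisation of the inner count
theorem icnt_parallel (m1 : Int) (ys : List Int) :
    icnt m1 "parallel" ys = if m1 = 0 then 0 else cntE m1 ys := by
  induction ys with
  | nil => simp [icnt, cntE]
  | cons y r ih =>
    simp only [icnt, cntE, ih]
    unfold clsKey; split_ifs <;> simp only [String.reduceEq, not_true, not_false_iff] at * <;> omega

theorem icnt_static (m1 : Int) (ys : List Int) :
    icnt m1 "static" ys = if m1 = 0 then cntZ ys else 0 := by
  induction ys with
  | nil => simp [icnt, cntZ]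
  | cons y r ih =>
    simp only [icnt, cntZ, ih]
    unfold clsKey; split_ifs <;> simp only [String.reduceEq, not_true, not_false_iff] at * <;> omega

theorem icnt_oblique (m1 : Int) (ys : List Int) :
    icnt m1 "oblique" ys = if m1 = 0 then cntP ys + cntN ys else cntZ ys := by
  induction ys with
  | nil => simp [icnt, cntP, cntN, cntZ]
  | cons y r ih =>
    simp only [icnt, cntP, cntN, cntZ, ih]
    unfold clsKey; split_ifs <;> simp only [String.reduceEq, not_true, not_false_iff] at * <;> omega

theorem icnt_similar (m1 : Int) (ys : List Int) :
    icnt m1 "similar" ys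
      = if m1 > 0 then cntP ys - cntE m1 ys else if m1 < 0 then cntN ys - cntE m1 ys else 0 := by
  induction ys with
  | nil => simp [icnt, cntP, cntN, cntE]
  | cons y r ih =>
    simp only [icnt, cntP, cntN, cntE, ih]
    unfold clsKey; split_ifs <;> simp only [String.reduceEq, not_true, not_false_iff] at * <;> omega

theorem icnt_contrary (m1 : Int) (ys : List Int) :
    icnt m1 "contrary" ys = if m1 > 0 then cntN ys else if m1 < 0 then cntP ys else 0 := by
  induction ys with
  | nil => simp [icnt, cntN, cntP]
  | cons y r ih =>
    simp only [icnt, cntN, cntP, ih]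
    unfold clsKey; split_ifs <;> simp only [String.reduceEq, not_true, not_false_iff] at * <;> omega

theorem pcnt_parallel (xs : List Int) : pcnt "parallel" xs = sP xs := by
  induction xs with
  | nil => rfl
  | cons x r ih => simp only [pcnt, sP, ih, icnt_parallel]

theorem pcnt_static (xs : List Int) : pcnt "static" xs = sSt xs := by
  induction xs with
  | nil => rfl
  | cons x r ih => simp only [pcnt, sSt, ih, icnt_static]

theorem pcnt_oblique (xs : List Int) : pcnt "oblique" xs = sO xs := by
  induction xs with
  | nil => rfl
  | cons x r ih => simp only [pcnt, sO, ih, icnt_oblique]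

theorem pcnt_similar (xs : List Int) : pcnt "similar" xs = sS xs := by
  induction xs with
  | nil => rfl
  | cons x r ih => simp only [pcnt, sS, ih, icnt_similar]

theorem pcnt_contrary (xs : List Int) : pcnt "contrary" xs = sC xs := by
  induction xs with
  | nil => rfl
  | cons x r ih => simp only [pcnt, sC, ih, icnt_contrary]

-- ---- B side ----

def filtNZ : List Int → List Int
  | [] => [] | x :: r => if x = 0 then filtNZ r else x :: filtNZ r

def ctrStep (d : PySem.Dict Int Int) (m : Int) : PySem.Dict Int Int := d.insert m (d.getD m 0 + 1)

theorem tallyB_spec :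
    ∀ (xs : List Int) (z p q : Int) (d : PySem.Dict Int Int),
      xs.foldl pvTallyB (z, p, q, d)
        = (z + cntZ xs, p + cntP xs, q + cntN xs, (filtNZ xs).foldl ctrStep d) := by
  intro xs
  induction xs with
  | nil => intro z p q d; simp [cntZ, cntP, cntN, filtNZ]
  | cons x r ih =>
    intro z p q d
    rw [List.foldl_cons]
    by_cases h0 : x = 0
    · have hs : pvTallyB (z, p, q, d) x = (z + 1, p, q, d) := by simp [pvTallyB, h0]
      rw [hs, ih]
      simp only [cntZ, cntP, cntN, filtNZ, if_pos h0]
      rw [if_neg (by omega : ¬ x > 0), if_neg (by omega : ¬ x < 0)]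
      refine congrArg₂ _ (by omega) (congrArg₂ _ (by omega) (congrArg₂ _ (by omega) rfl))
    · by_cases hp : x > 0
      · have hs : pvTallyB (z, p, q, d) x = (z, p + 1, q, ctrStep d x) := by
          simp [pvTallyB, h0, hp, ctrStep]
        rw [hs, ih]
        simp only [cntZ, cntP, cntN, filtNZ]
        rw [if_neg h0, if_neg h0, if_pos hp, if_neg (by omega : ¬ x < 0), List.foldl_cons]
        refine congrArg₂ _ (by omega) (congrArg₂ _ (by omega) (congrArg₂ _ (by omega) rfl))
      · have hs : pvTallyB (z, p, q, d) x = (z, p, q + 1, ctrStep d x) := by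
          simp [pvTallyB, h0, hp, ctrStep]
        rw [hs, ih]
        simp only [cntZ, cntP, cntN, filtNZ]
        rw [if_neg h0, if_neg h0, if_neg hp, if_pos (by omega : x < 0), List.foldl_cons]
        refine congrArg₂ _ (by omega) (congrArg₂ _ (by omega) (congrArg₂ _ (by omega) rfl))

def g0 (p : Int) : Int := PySem.Int.floordiv (p * (p - 1)) 2

theorem g0_succ (p : Int) : g0 (p + 1) = g0 p + p := by
  unfold g0
  have h : (p + 1) * (p + 1 - 1) = p * (p - 1) + 2 * p := by ring
  rw [h, PySem.Int.floordiv_eq_ediv_of_pos (show (0:Int) < 2 by omega),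
    PySem.Int.floordiv_eq_ediv_of_pos (show (0:Int) < 2 by omega)]
  omega

theorem g0_succ' (p : Int) : g0 (1 + p) = p + g0 p := by
  rw [add_comm 1 p, g0_succ]; omega

def sumPar (d : PySem.Dict Int Int) : Int :=
  (d.values.map (fun c => PySem.Int.floordiv (c * (c - 1)) 2)).sum

def crossD (d : PySem.Dict Int Int) : List Int → Int
  | [] => 0 | y :: r => d.getD y 0 + crossD d r

def within : List Int → Int
  | [] => 0 | y :: r => cntE y r + within r

theorem sum_map_update (m δ : Int) (g g' : Int → Int) :
    ∀ (l : List Int), l.Nodup → m ∈ l → (∀ x ∈ l, x ≠ m → g' x = g x) → g' m = g m + δ →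
      (l.map g').sum = (l.map g).sum + δ := by
  intro l
  induction l with
  | nil => intro _ h; cases h
  | cons a t ih =>
    intro hnd hm hne hd
    rcases List.mem_cons.mp hm with rfl | hmt
    · have : ∀ x ∈ t, g' x = g x := by
        intro x hx
        exact hne x (List.mem_cons_of_mem _ hx) (fun he => (List.nodup_cons.mp hnd).1 (he ▸ hx))
      simp [List.map_congr_left this, hd]; omega
    · have ha : g' a = g a := hne a (List.mem_cons_self) (fun he => (List.nodup_cons.mp hnd).1 (he ▸ hmt))
      have := ih (List.nodup_cons.mp hnd).2 hmt (fun x hx => hne x (List.mem_cons_of_mem _ hx)) hd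
      simp [ha, this]; omega

theorem sumPar_insert (d : PySem.Dict Int Int) (hnd : d.keys.Nodup) (m : Int) :
    sumPar (ctrStep d m) = sumPar d + d.getD m 0 := by
  have hnd' : (ctrStep d m).keys.Nodup := PySem.Dict.nodup_keys_insert _ _ _ hnd
  unfold sumPar
  rw [PySem.Dict.values_eq_map_keys _ hnd' 0, PySem.Dict.values_eq_map_keys _ hnd 0,
    List.map_map, List.map_map]
  by_cases hc : d.contains m = true
  · have hkeys : (ctrStep d m).keys = d.keys := by
      unfold ctrStep; exact PySem.Dict.keys_insert_of_contains d _ hc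
    rw [hkeys]
    refine sum_map_update m (d.getD m 0) _ _ d.keys hnd
      ((PySem.Dict.contains_iff_mem_keys _ _).mp hc) ?_ ?_
    · intro x _ hxm
      simp only [Function.comp_apply, ctrStep]
      rw [PySem.Dict.getD_insert, if_neg hxm]
    · simp only [Function.comp_apply, ctrStep]
      rw [PySem.Dict.getD_insert, if_pos rfl]
      have := g0_succ (d.getD m 0)
      unfold g0 at this
      omega
  · have hc' : d.contains m = false := by rw [Bool.not_eq_true] at hc; exact hc
    have hkeys : (ctrStep d m).keys = d.keys ++ [m] := by
      unfold ctrStep; exact PySem.Dict.keys_insert_of_not_contains d _ hc'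
    have hm0 : d.getD m 0 = 0 := PySem.Dict.getD_of_not_contains d 0 hc'
    rw [hkeys, List.map_append, List.sum_append]
    have hnm : m ∉ d.keys := by
      intro hmem
      rw [(PySem.Dict.contains_iff_mem_keys _ _).mpr hmem] at hc'; cases hc'
    have heq : ∀ x ∈ d.keys,
        ((fun c => PySem.Int.floordiv (c * (c - 1)) 2) ∘ fun k => (ctrStep d m).getD k 0) x
          = ((fun c => PySem.Int.floordiv (c * (c - 1)) 2) ∘ fun k => d.getD k 0) x := by
      intro x hx
      have hxm : x ≠ m := fun he => hnm (he ▸ hx)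
      simp only [Function.comp_apply, ctrStep]
      rw [PySem.Dict.getD_insert, if_neg hxm]
    rw [List.map_congr_left heq, hm0]
    simp [ctrStep, PySem.Dict.getD_insert, hm0]

theorem crossD_insert (d : PySem.Dict Int Int) (y : Int) :
    ∀ (r : List Int), crossD (ctrStep d y) r = crossD d r + cntE y r := by
  intro r
  induction r with
  | nil => simp [crossD, cntE]
  | cons a t ih =>
    simp only [crossD, cntE, ih]
    have hget : (ctrStep d y).getD a 0 = if a = y then d.getD y 0 + 1 else d.getD a 0 := by
      unfold ctrStep; rw [PySem.Dict.getD_insert]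
    rw [hget]
    split_ifs with h
    · subst h; omega
    · omega

theorem sumPar_fold :
    ∀ (ys : List Int) (d : PySem.Dict Int Int), d.keys.Nodup →
      sumPar (ys.foldl ctrStep d) = sumPar d + crossD d ys + within ys := by
  intro ys
  induction ys with
  | nil => intro d _; simp [crossD, within]
  | cons y r ih =>
    intro d hnd
    have hnd' : (ctrStep d y).keys.Nodup := by
      unfold ctrStep; exact PySem.Dict.nodup_keys_insert _ _ _ hnd
    rw [List.foldl_cons, ih _ hnd', sumPar_insert d hnd y, crossD_insert]
    simp [crossD, within]; omega

theorem crossD_empty : ∀ (ys : List Int), crossD (PySem.Dict.empty : PySem.Dict Int Int) ys = 0 := by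
  intro ys
  induction ys with
  | nil => rfl
  | cons y r ih => simp [crossD, ih, PySem.Dict.getD_empty]

theorem cntE_filtNZ (v : Int) (hv : v ≠ 0) : ∀ (r : List Int), cntE v (filtNZ r) = cntE v r := by
  intro r
  induction r with
  | nil => rfl
  | cons a t ih =>
    by_cases h : a = 0
    · simp only [filtNZ, if_pos h, cntE, ih]
      rw [if_neg (by omega)]; omega
    · simp only [filtNZ, if_neg h, cntE, ih]

theorem within_filtNZ : ∀ (xs : List Int), within (filtNZ xs) = sP xs := by
  intro xs
  induction xs with
  | nil => rfl
  | cons x r ih =>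
    by_cases h : x = 0
    · simp only [filtNZ, if_pos h, sP, ih]; omega
    · simp only [filtNZ, if_neg h, within, sP, ih, cntE_filtNZ x h]

theorem trich : ∀ (xs : List Int), cntZ xs + cntP xs + cntN xs = (xs.length : Int) := by
  intro xs
  induction xs with
  | nil => simp [cntZ, cntP, cntN]
  | cons x r ih =>
    simp only [cntZ, cntP, cntN, List.length_cons]
    push_cast
    split_ifs <;> omega

theorem sim_par (xs : List Int) : sS xs + sP xs = g0 (cntP xs) + g0 (cntN xs) := by
  induction xs with
  | nil => simp [sS, sP, cntP, cntN, g0, PySem.Int.floordiv]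
  | cons x r ih =>
    simp only [sS, sP, cntP, cntN]
    split_ifs <;> (try simp only [zero_add, g0_succ']) <;> omega

theorem con_eq (xs : List Int) : sC xs = cntP xs * cntN xs := by
  induction xs with
  | nil => simp [sC, cntP, cntN]
  | cons x r ih =>
    simp only [sC, cntP, cntN, ih]
    split_ifs <;> first | omega | ring

theorem obl_eq (xs : List Int) : sO xs = cntZ xs * ((xs.length : Int) - cntZ xs) := by
  induction xs with
  | nil => simp [sO, cntZ]
  | cons x r ih =>
    have htr := trich r
    simp only [sO, cntZ, ih, List.length_cons]
    push_cast
    split_ifs with h1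
    · have h2 : cntP r + cntN r = (r.length : Int) - cntZ r := by omega
      rw [h2]; ring
    · ring

theorem sta_eq (xs : List Int) : sSt xs = g0 (cntZ xs) := by
  induction xs with
  | nil => simp [sSt, cntZ, g0, PySem.Int.floordiv]
  | cons x r ih =>
    simp only [sSt, cntZ, ih]
    split_ifs with h1 <;> simp only [zero_add, g0_succ']

-- ===== VERDICT (by name: the statement is the Claim_ definition above) =====
theorem classify_motions_py_spec : Claim_equal_classify_motions_py := by
  intro movements _
  unfold Spec_classify_motions_py classify_motions_py classify_motions_py_alt
  -- A side
  set init : PySem.Dict String Int :=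
    PySem.Dict.ofList [("parallel", 0), ("similar", 0), ("contrary", 0), ("oblique", 0), ("static", 0)] with hinit
  have hinitk : init.keys = K5 := by rw [hinit]; rfl
  have h0 : (0 : Int) = ((([] : List Int).length : Nat) : Int) := by simp
  have hmv : movements = [] ++ movements := by simp
  have hkeys : ((PySem.List.enumerate movements 0).foldl (pvInnerA movements) init).keys = K5 := by
    rw [h0]; conv_lhs => rw [hmv]
    exact outerA_keys movements [] init hinitk
  have hgetD : ∀ k : String, ((PySem.List.enumerate movements 0).foldl (pvInnerA movements) init).getD k 0
      = init.getD k 0 + pcnt k movements := by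
    intro k; rw [h0]; conv_lhs => rw [hmv]
    exact outerA_getD k movements [] init
  have hnd : (((PySem.List.enumerate movements 0).foldl (pvInnerA movements) init)).keys.Nodup := by
    rw [hkeys]; decide
  rw [PySem.Dict.items_eq_map_keys _ hnd 0, hkeys]
  have hi1 : init.getD "parallel" 0 = 0 := by rw [hinit]; decide
  have hi2 : init.getD "similar" 0 = 0 := by rw [hinit]; decide
  have hi3 : init.getD "contrary" 0 = 0 := by rw [hinit]; decide
  have hi4 : init.getD "oblique" 0 = 0 := by rw [hinit]; decide
  have hi5 : init.getD "static" 0 = 0 := by rw [hinit]; decide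
  -- B side
  rw [tallyB_spec movements 0 0 0 PySem.Dict.empty]
  have hsum : sumPar ((filtNZ movements).foldl ctrStep PySem.Dict.empty) = sP movements := by
    rw [sumPar_fold _ _ (by decide), crossD_empty, within_filtNZ]
    show (0:Int) + 0 + sP movements = _
    omega
  unfold sumPar at hsum
  simp only [K5, List.map_cons, List.map_nil, hgetD, hi1, hi2, hi3, hi4, hi5, zero_add,
    pcnt_parallel, pcnt_similar, pcnt_contrary, pcnt_oblique, pcnt_static]
  simp only [hsum]
  have hS := sim_par movements
  have hC := con_eq movements
  have hO := obl_eq movements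
  have hSt := sta_eq movements
  unfold g0 at hS hSt
  simp only [List.cons.injEq, Prod.mk.injEq, true_and, and_true]
  exact ⟨by omega, hC, hO, by omega⟩
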